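-- pv_equiv track=rewrite | github.com/de1chk1nd/resources-and-tools | tools/xc-ns-mover/src/xc_ns_mover/client.py | domain_matches_cert
-- ===== SOURCE A (Python) =====
-- def domain_matches_cert(domain: str, cert_domains: list[str]) -> bool:
--     """Check if *domain* is covered by any of *cert_domains*.
--
--     Supports wildcard matching per RFC 6125:
--
--     - ``*.example.com`` matches ``app.example.com``
--     - ``*.example.com`` does **not** match ``sub.app.example.com``
--     - ``*.example.com`` does **not** match ``example.com`` itself
--     """
--     domain = domain.lower().strip(".")
--     for cert_domain in cert_domains:
--         cd = cert_domain.lower().strip(".")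
--         if cd == domain:
--             return True
--         # Wildcard: *.example.com
--         if cd.startswith("*."):
--             wildcard_base = cd[2:]  # "example.com"
--             if domain.endswith("." + wildcard_base):
--                 prefix = domain[: -(len(wildcard_base) + 1)]
--                 if prefix and "." not in prefix:
--                     return True
--     return False
-- ===== SOURCE B (Python) =====
-- def domain_matches_cert(domain: str, cert_domains: list[str]) -> bool:
--     exact = set()
--     wildcard_bases = set()
--     for cert_domain in cert_domains:
--         cd = cert_domain.lower().strip(".")
--         exact.add(cd)
--         if cd.startswith("*."):
--             wildcard_bases.add(cd[2:])
--     d = domain.lower().strip(".")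
--     if d in exact:
--         return True
--     i = d.find(".")
--     return i > 0 and d[i + 1:] in wildcard_bases
-- ===== Notes on version B (the rewrite author's own statement) =====
-- stated objective: alternative
-- what changed: B replaces A's per-certificate scan (normalize and wildcard-test every cert against the domain) with a single indexing pass that builds an exact-name set and a wildcard-base set, then answers with two set lookups after splitting the domain at its first dot.
import Mathlib
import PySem

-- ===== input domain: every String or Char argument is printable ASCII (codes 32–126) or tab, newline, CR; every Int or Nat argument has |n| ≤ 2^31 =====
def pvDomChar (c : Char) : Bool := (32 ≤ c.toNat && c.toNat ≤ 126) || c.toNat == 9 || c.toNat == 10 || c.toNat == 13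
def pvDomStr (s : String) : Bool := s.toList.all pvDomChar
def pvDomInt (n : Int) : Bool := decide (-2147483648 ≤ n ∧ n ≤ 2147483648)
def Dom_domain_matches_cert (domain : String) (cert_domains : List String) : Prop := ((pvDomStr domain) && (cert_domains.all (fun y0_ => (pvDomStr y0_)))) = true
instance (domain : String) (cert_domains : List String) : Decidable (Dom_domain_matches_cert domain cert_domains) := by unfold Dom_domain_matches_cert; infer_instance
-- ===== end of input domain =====

-- B replaces A's per-certificate scanning (normalize and test every cert against the domain)
-- by one indexing pass that builds an exact-name set and a wildcard-base set, followed by two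
-- set lookups; objective: alternative (index-build-then-lookup instead of repeated scanning).

-- ===== PORT A =====
-- shared normalization `s.lower().strip(".")`
def dmcNorm (s : String) : String := PySem.Str.stripChars (PySem.Str.lower s) "."

-- the `for cert_domain in cert_domains:` loop of A (early return = true)
def dmcLoopA (d : String) : List String → Bool
  | [] => false
  | cert_domain :: rest =>
    let cd := dmcNorm cert_domain
    if cd == d then true
    else if PySem.Str.startswith cd "*." then
      let wildcard_base := PySem.Str.slice cd (some 2) none
      if PySem.Str.endswith d ("." ++ wildcard_base) then
        let pref := PySem.Str.slice d none (some (-(PySem.Str.len wildcard_base + 1)))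
        if pref ≠ "" && !(PySem.Str.isIn "." pref) then true
        else dmcLoopA d rest
      else dmcLoopA d rest
    else dmcLoopA d rest

def domain_matches_cert (domain : String) (cert_domains : List String) : Bool :=
  dmcLoopA (dmcNorm domain) cert_domains

-- ===== PORT B =====
-- one step of B's indexing loop: add the normalized cert to `exact`, and its base to `wildcard_bases` if it is a wildcard
def dmcStep (acc : PySem.Set String × PySem.Set String) (cert_domain : String) :
    PySem.Set String × PySem.Set String :=
  let cd := dmcNorm cert_domain
  (acc.1.add cd,
   if PySem.Str.startswith cd "*." then acc.2.add (PySem.Str.slice cd (some 2) none) else acc.2)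

def dmcIndex (cert_domains : List String) : PySem.Set String × PySem.Set String :=
  cert_domains.foldl dmcStep (PySem.Set.empty, PySem.Set.empty)

def domain_matches_cert_alt (domain : String) (cert_domains : List String) : Bool :=
  let idx := dmcIndex cert_domains
  let d := dmcNorm domain
  if idx.1.contains d then true
  else
    let i := PySem.Str.find d "."
    decide (0 < i) && idx.2.contains (PySem.Str.slice d (some (i + 1)) none)

-- ===== PRECONDITION & SPEC =====
def Spec_domain_matches_cert (domain : String) (cert_domains : List String) (out : Bool) : Prop := out = domain_matches_cert_alt domain cert_domains
instance (domain : String) (cert_domains : List String) (out : Bool) : Decidable (Spec_domain_matches_cert domain cert_domains out) := by unfold Spec_domain_matches_cert; infer_instance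

-- ===== CLAIM (what is proved, stated in full; the proofs are below) =====
def Claim_equal_domain_matches_cert : Prop := ∀ (domain : String) (cert_domains : List String), Dom_domain_matches_cert domain cert_domains → Spec_domain_matches_cert domain cert_domains (domain_matches_cert domain cert_domains)

-- ===== LEMMAS AND PROOFS =====

-- A's wildcard test for one base, and A's whole per-cert test
def dmcWildA (d base : String) : Bool :=
  PySem.Str.endswith d ("." ++ base) &&
  ((decide (PySem.Str.slice d none (some (-(PySem.Str.len base + 1))) ≠ "")) &&
   !(PySem.Str.isIn "." (PySem.Str.slice d none (some (-(PySem.Str.len base + 1))))))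

def dmcMatchA (d cd : String) : Bool :=
  (cd == d) || (PySem.Str.startswith cd "*." && dmcWildA d (PySem.Str.slice cd (some 2) none))

lemma dmcLoopA_eq_any (d : String) (l : List String) :
    dmcLoopA d l = l.any (fun c => dmcMatchA d (dmcNorm c)) := by
  induction l with
  | nil => simp [dmcLoopA]
  | cons c rest ih =>
    rw [List.any_cons, ← ih]
    simp only [dmcLoopA]
    split_ifs <;>
      simp_all only [dmcMatchA, dmcWildA, Bool.not_eq_true, Bool.true_or, Bool.false_or,
        Bool.false_and, Bool.and_true, Bool.and_false, Bool.or_false]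

lemma singleton_infix {α : Type} (a : α) (l : List α) : [a] <:+: l ↔ a ∈ l := by
  constructor
  · intro h; exact h.subset (by simp)
  · intro h
    obtain ⟨s, t, rfl⟩ := List.append_of_mem h
    exact ⟨s, t, by simp⟩

-- the heart: A's wildcard check for a given base equals B's first-dot split test
lemma dmcCore (cs bs : List Char) :
    (PySem.Chars.endswith cs ('.' :: bs)
      && (decide (List.take (cs.length - (bs.length + 1)) cs ≠ [])
          && !(PySem.Chars.isIn ['.'] (List.take (cs.length - (bs.length + 1)) cs))))
    = (decide (0 < PySem.Chars.find cs ['.'])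
      && decide (List.drop (PySem.Chars.find cs ['.'] + 1).toNat cs = bs)) := by
  rw [Bool.eq_iff_iff]
  simp only [Bool.and_eq_true, decide_eq_true_iff, PySem.Chars.endswith_iff,
    Bool.not_eq_true', PySem.Chars.isIn_eq_false_iff, singleton_infix]
  constructor
  · rintro ⟨⟨p, hp⟩, hne, hnd⟩
    subst hp
    have htake : List.take ((p ++ '.' :: bs).length - (bs.length + 1)) (p ++ '.' :: bs) = p :=
      List.take_left' (by simp)
    rw [htake] at hne hnd
    have hf0 : 0 ≤ PySem.Chars.find (p ++ '.' :: bs) ['.'] :=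
      (PySem.Chars.find_nonneg_iff _ _).mpr ((singleton_infix _ _).mpr (by simp))
    obtain ⟨h1, h2⟩ := PySem.Chars.find_spec hf0
    have hplen : (PySem.Chars.find (p ++ '.' :: bs) ['.']).toNat = p.length := by
      rcases lt_trichotomy (PySem.Chars.find (p ++ '.' :: bs) ['.']).toNat p.length with hlt | heq | hgt
      · exfalso
        obtain ⟨t, ht⟩ := h1
        have hfl : (PySem.Chars.find (p ++ '.' :: bs) ['.']).toNat < (p ++ '.' :: bs).length := by
          simp; omega
        rw [List.drop_eq_getElem_cons hfl] at ht
        have hhead : (p ++ '.' :: bs)[(PySem.Chars.find (p ++ '.' :: bs) ['.']).toNat] = '.' :=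
          (List.cons_eq_cons.mp ht).1.symm
        rw [List.getElem_append_left hlt] at hhead
        exact hnd (hhead ▸ List.getElem_mem hlt)
      · exact heq
      · exfalso
        refine h2 p.length hgt ⟨bs, ?_⟩
        rw [List.drop_left]
        rfl
    have hne' : p.length ≠ 0 := fun h => hne (List.eq_nil_of_length_eq_zero h)
    refine ⟨by omega, ?_⟩
    have h1' : (PySem.Chars.find (p ++ '.' :: bs) ['.'] + 1).toNat = p.length + 1 := by omega
    rw [h1']
    rw [show p.length + 1 = p.length + 1 from rfl, ← List.drop_drop, List.drop_left]
    rfl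
  · rintro ⟨hf, hdrop⟩
    have hf0 : 0 ≤ PySem.Chars.find cs ['.'] := le_of_lt hf
    obtain ⟨h1, h2⟩ := PySem.Chars.find_spec hf0
    have hfle : PySem.Chars.find cs ['.'] ≤ (cs.length : ℤ) := PySem.Chars.find_le_length _ _
    obtain ⟨t, ht⟩ := h1
    have hflt : (PySem.Chars.find cs ['.']).toNat < cs.length := by
      have h := congrArg List.length ht
      simp [List.length_drop] at h
      omega
    have h2' : (PySem.Chars.find cs ['.'] + 1).toNat = (PySem.Chars.find cs ['.']).toNat + 1 := by omega
    rw [h2'] at hdrop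
    have hdropf : List.drop (PySem.Chars.find cs ['.']).toNat cs = '.' :: bs := by
      rw [List.drop_eq_getElem_cons hflt] at ht ⊢
      have hh := (List.cons_eq_cons.mp ht).1
      rw [← hh, hdrop]
    have hcs : List.take (PySem.Chars.find cs ['.']).toNat cs ++ ('.' :: bs) = cs := by
      rw [← hdropf]; exact List.take_append_drop _ _
    have hlen : cs.length - (bs.length + 1) = (PySem.Chars.find cs ['.']).toNat := by
      have h := congrArg List.length hcs
      simp [List.length_append, List.length_take] at h
      omega
    have hlentake : (List.take (PySem.Chars.find cs ['.']).toNat cs).length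
        = (PySem.Chars.find cs ['.']).toNat := by
      simp [List.length_take]; omega
    refine ⟨⟨List.take (PySem.Chars.find cs ['.']).toNat cs, hcs⟩, ?_, ?_⟩
    · rw [hlen]
      intro hnil
      rw [hnil] at hlentake
      simp at hlentake
      omega
    · rw [hlen]
      intro hmem
      obtain ⟨j, hj, hgetj⟩ := List.getElem_of_mem hmem
      have hjlt : j < (PySem.Chars.find cs ['.']).toNat := by
        rw [hlentake] at hj; exact hj
      have hjcs : j < cs.length := by omega
      refine h2 j hjlt ⟨List.drop (j + 1) cs, ?_⟩
      rw [List.drop_eq_getElem_cons hjcs]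
      have : cs[j] = '.' := by
        rw [← hgetj]; simp
      rw [this]
      rfl

lemma str_ne_empty_iff (s : String) : s ≠ "" ↔ s.toList ≠ [] :=
  not_congr ⟨fun h => by rw [h]; rfl, fun h => String.toList_inj.mp (h.trans rfl)⟩

-- Str-level form of the core lemma
lemma dmcWildA_eq (d base : String) :
    dmcWildA d base
    = (decide (0 < PySem.Str.find d ".")
       && (PySem.Str.slice d (some (PySem.Str.find d "." + 1)) none == base)) := by
  have hfind : PySem.Str.find d "." = PySem.Chars.find d.toList ['.'] := PySem.Str.find_eq d "."
  have hnn : (0 : Int) ≤ PySem.Chars.find d.toList ['.'] + 1 := by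
    have := PySem.Chars.neg_one_le_find d.toList ['.']; omega
  have hslice : (PySem.Str.slice d (some (PySem.Chars.find d.toList ['.'] + 1)) none).toList
      = List.drop (PySem.Chars.find d.toList ['.'] + 1).toNat d.toList := by
    rw [PySem.Str.toList_slice]
    simp only [PySem.Chars.slice_eq_listSlice]
    rw [PySem.List.slice_from _ hnn]
  have hpref : (PySem.Str.slice d none (some (-(PySem.Str.len base + 1)))).toList
      = List.take (d.toList.length - (base.toList.length + 1)) d.toList := by
    rw [PySem.Str.toList_slice]
    simp only [PySem.Chars.slice_eq_listSlice]
    have h : -(PySem.Str.len base + 1) = -(((base.toList.length + 1 : ℕ) : ℤ)) := by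
      rw [PySem.Str.len_eq]; push_cast; ring
    rw [h, PySem.List.slice_to_neg_natCast _ _ (by omega)]
  unfold dmcWildA
  rw [PySem.Str.endswith_eq]
  have happ : ("." ++ base).toList = '.' :: base.toList := by
    rw [String.toList_append]; rfl
  rw [happ, hfind]
  rw [show decide (PySem.Str.slice d none (some (-(PySem.Str.len base + 1))) ≠ "")
      = decide ((PySem.Str.slice d none (some (-(PySem.Str.len base + 1)))).toList ≠ [])
      from decide_eq_decide.mpr (str_ne_empty_iff _)]
  rw [PySem.Str.isIn_eq, show ("." : String).toList = ['.'] from rfl, hpref]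
  rw [show (PySem.Str.slice d (some (PySem.Chars.find d.toList ['.'] + 1)) none == base)
      = decide ((PySem.Str.slice d (some (PySem.Chars.find d.toList ['.'] + 1)) none).toList
          = base.toList) from by
    rw [Bool.eq_iff_iff]; simp only [beq_iff_eq, decide_eq_true_iff, String.toList_inj]]
  rw [hslice]
  exact dmcCore d.toList base.toList

lemma dmc_mem_index (l : List String) (e w : PySem.Set String) (x y : String) :
    (x ∈ (l.foldl dmcStep (e, w)).1 ↔ x ∈ e ∨ ∃ c ∈ l, dmcNorm c = x) ∧
    (y ∈ (l.foldl dmcStep (e, w)).2 ↔ y ∈ w ∨ ∃ c ∈ l,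
        PySem.Str.startswith (dmcNorm c) "*." = true ∧ PySem.Str.slice (dmcNorm c) (some 2) none = y) := by
  induction l generalizing e w with
  | nil => simp
  | cons c rest ih =>
    simp only [List.foldl_cons, dmcStep]
    by_cases hw : PySem.Str.startswith (dmcNorm c) "*." = true
    · rw [if_pos hw]
      refine ⟨?_, ?_⟩
      · rw [(ih _ _).1, PySem.Set.mem_add]
        simp only [List.mem_cons]
        constructor
        · rintro ((h | rfl) | ⟨c', hc', rfl⟩)
          · exact Or.inl h
          · exact Or.inr ⟨c, Or.inl rfl, rfl⟩
          · exact Or.inr ⟨c', Or.inr hc', rfl⟩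
        · rintro (h | ⟨c', hc' | hc', rfl⟩)
          · exact Or.inl (Or.inl h)
          · subst hc'; exact Or.inl (Or.inr rfl)
          · exact Or.inr ⟨c', hc', rfl⟩
      · rw [(ih _ _).2, PySem.Set.mem_add]
        simp only [List.mem_cons]
        constructor
        · rintro ((h | rfl) | ⟨c', hc', h2, rfl⟩)
          · exact Or.inl h
          · exact Or.inr ⟨c, Or.inl rfl, hw, rfl⟩
          · exact Or.inr ⟨c', Or.inr hc', h2, rfl⟩
        · rintro (h | ⟨c', hc' | hc', h2, rfl⟩)
          · exact Or.inl (Or.inl h)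
          · subst hc'; exact Or.inl (Or.inr rfl)
          · exact Or.inr ⟨c', hc', h2, rfl⟩
    · rw [if_neg hw]
      refine ⟨?_, ?_⟩
      · rw [(ih _ _).1, PySem.Set.mem_add]
        simp only [List.mem_cons]
        constructor
        · rintro ((h | rfl) | ⟨c', hc', rfl⟩)
          · exact Or.inl h
          · exact Or.inr ⟨c, Or.inl rfl, rfl⟩
          · exact Or.inr ⟨c', Or.inr hc', rfl⟩
        · rintro (h | ⟨c', hc' | hc', rfl⟩)
          · exact Or.inl (Or.inl h)
          · subst hc'; exact Or.inl (Or.inr rfl)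
          · exact Or.inr ⟨c', hc', rfl⟩
      · rw [(ih _ _).2]
        simp only [List.mem_cons]
        constructor
        · rintro (h | ⟨c', hc', h2, rfl⟩)
          · exact Or.inl h
          · exact Or.inr ⟨c', Or.inr hc', h2, rfl⟩
        · rintro (h | ⟨c', hc' | hc', h2, rfl⟩)
          · exact Or.inl h
          · subst hc'; exact absurd h2 hw
          · exact Or.inr ⟨c', hc', h2, rfl⟩

-- ===== VERDICT (by name: the statement is the Claim_ definition above) =====
theorem domain_matches_cert_spec : Claim_equal_domain_matches_cert := by
  intro domain l _
  unfold Spec_domain_matches_cert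
  unfold domain_matches_cert domain_matches_cert_alt dmcIndex
  rw [dmcLoopA_eq_any, Bool.eq_iff_iff]
  have hmem1 : (dmcNorm domain) ∈ (l.foldl dmcStep (PySem.Set.empty, PySem.Set.empty)).1 ↔
      (∃ c ∈ l, dmcNorm c = dmcNorm domain) :=
    ((dmc_mem_index l _ _ (dmcNorm domain) (dmcNorm domain)).1).trans
      (or_iff_right (by simp [PySem.Set.empty]))
  have hmem2 : ∀ y, y ∈ (l.foldl dmcStep (PySem.Set.empty, PySem.Set.empty)).2 ↔
      (∃ c ∈ l, PySem.Str.startswith (dmcNorm c) "*." = true ∧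
        PySem.Str.slice (dmcNorm c) (some 2) none = y) := fun y =>
    ((dmc_mem_index l _ _ y y).2).trans (or_iff_right (by simp [PySem.Set.empty]))
  by_cases hb : (l.foldl dmcStep (PySem.Set.empty, PySem.Set.empty)).1.contains (dmcNorm domain) = true
  · rw [if_pos hb]
    obtain ⟨c, hcl, hc⟩ := hmem1.mp ((PySem.Set.contains_iff _ _).mp hb)
    refine iff_of_true (List.any_eq_true.mpr ⟨c, hcl, ?_⟩) rfl
    simp only [dmcMatchA, hc, beq_self_eq_true, Bool.true_or]
  · rw [if_neg hb]
    have hne : ¬ ∃ c ∈ l, dmcNorm c = dmcNorm domain := fun h =>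
      hb ((PySem.Set.contains_iff _ _).mpr (hmem1.mpr h))
    simp only [List.any_eq_true, dmcMatchA, dmcWildA_eq, Bool.or_eq_true, Bool.and_eq_true,
      beq_iff_eq, decide_eq_true_iff, PySem.Set.contains_iff, hmem2]
    constructor
    · rintro ⟨c, hcl, h | ⟨hsw, hi, hrest⟩⟩
      · exact absurd (⟨c, hcl, h⟩ : ∃ c ∈ l, dmcNorm c = dmcNorm domain) hne
      · exact ⟨hi, ⟨c, hcl, hsw, hrest.symm⟩⟩
    · rintro ⟨hi, c, hcl, hsw, hrest⟩
      exact ⟨c, hcl, Or.inr ⟨hsw, hi, hrest.symm⟩⟩
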